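-- pv_equiv track=rewrite | github.com/tylerneylon/bigoh_images | src/antisort_example2.py | antisorted
-- ===== SOURCE A (Python) =====
-- def antisorted(arr, stack_limit=-1):
--   if stack_limit == 0: return arr
--   if len(arr) < 2: return arr
--   sortedarr = sorted(arr)
--   i = 0
--   left, right = [], []
--   while True:
--     right.append(sortedarr[i])
--     i += 1
--     if i == len(arr): break
--     left.append(sortedarr[i])
--     i += 1
--     if i == len(arr): break
--   return antisorted(left, stack_limit - 1) + antisorted(right, stack_limit - 1)
-- ===== SOURCE B (Python) =====
-- def antisorted(arr, stack_limit=-1):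
--   # computes each element's final position directly by index arithmetic
--   # instead of recursively splitting lists
--   if stack_limit == 0 or len(arr) < 2:
--     return arr
--   s = sorted(arr)
--   n = len(s)
--   out = [0] * n
--   for j in range(n):
--     out[_pos(j, n, stack_limit)] = s[j]
--   return out
--
-- def _pos(i, n, k):
--   # final position of sorted index i in a block of size n with k levels left:
--   # odd indices go to the left block (size n//2), even to the right block.
--   off = 0
--   while k != 0 and n >= 2:
--     if i % 2 == 1:
--       i //= 2
--       n //= 2
--     else:
--       off += n // 2
--       i //= 2
--       n = (n + 1) // 2
--     k -= 1
--   return off + i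
-- ===== Notes on version B (the rewrite author's own statement) =====
-- stated objective: alternative
-- what changed: B does no recursive list splitting at all: it sorts once and computes each sorted element's final position directly by iterative index arithmetic (halving index/block size per level), writing into a preallocated output array.
import Mathlib
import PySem

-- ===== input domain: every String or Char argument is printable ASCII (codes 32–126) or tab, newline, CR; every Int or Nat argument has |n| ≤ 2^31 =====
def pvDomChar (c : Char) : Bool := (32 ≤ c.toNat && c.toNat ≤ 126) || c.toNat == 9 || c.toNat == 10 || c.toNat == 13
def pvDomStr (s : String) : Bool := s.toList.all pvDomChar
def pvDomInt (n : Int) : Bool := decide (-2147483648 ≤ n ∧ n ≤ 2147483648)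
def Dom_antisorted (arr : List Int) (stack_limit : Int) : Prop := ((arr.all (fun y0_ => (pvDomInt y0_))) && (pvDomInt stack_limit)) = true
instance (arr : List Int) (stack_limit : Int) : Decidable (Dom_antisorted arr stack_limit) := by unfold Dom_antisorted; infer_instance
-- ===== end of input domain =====

set_option maxRecDepth 4000


-- B replaces A's recursive list-splitting by direct index arithmetic: it sorts once and, for each
-- sorted index, computes the final position by an iterative halving loop, writing into a
-- preallocated output list.  Return values proved equal; neither mutates its argument.

-- ===== PORT A =====
-- the 'while True' loop of A: right.append(sortedarr[i]); i+=1; break if i==len(arr); left.append(…);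
-- i+=1; break if i==len(arr).  The fuel-0 arm is a totality guard for loop states the Python loop
-- never reaches from its call site (there i=0, fuel = n = len(s) ≥ 2).
def dealLoop (s : List Int) (n : Nat) (fuel i : Nat) (left right : List Int) : List Int × List Int :=
  let right' := right ++ [(PySem.List.pyGet? s (i : Int)).getD 0]
  if i + 1 = n then (left, right')
  else
    let left' := left ++ [(PySem.List.pyGet? s ((i : Int) + 1)).getD 0]
    if i + 2 = n then (left', right')
    else match fuel with
      | 0 => (left', right')
      | fuel + 1 => dealLoop s n fuel (i + 2) left' right'

-- A's recursion, structurally on fuel; called with fuel = len(arr), and the recursive lists are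
-- strictly shorter than arr, so the fuel-0 arm (a totality guard) is never reached.
def antisortedGo (fuel : Nat) (arr : List Int) (stack_limit : Int) : List Int :=
  if stack_limit = 0 then arr
  else if arr.length < 2 then arr
  else match fuel with
    | 0 => arr
    | fuel + 1 =>
      let s := PySem.List.sorted arr (fun x => x) false
      let lr := dealLoop s arr.length arr.length 0 [] []
      antisortedGo fuel lr.1 (stack_limit - 1) ++ antisortedGo fuel lr.2 (stack_limit - 1)

def antisorted (arr : List Int) (stack_limit : Int) : List Int :=
  antisortedGo arr.length arr stack_limit

-- ===== PORT B =====
-- Source B's _pos loop, as structural recursion on the shrinking block size n.  The loop indices i, n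
-- are nonnegative Python ints, so Python's // and % agree exactly with Nat division here.
def posGo (i n : Nat) (k : Int) (off : Nat) : Nat :=
  if k = 0 ∨ n < 2 then off + i
  else if i % 2 = 1 then posGo (i / 2) (n / 2) (k - 1) off
  else posGo (i / 2) ((n + 1) / 2) (k - 1) (off + n / 2)
  termination_by n
  decreasing_by all_goals omega

-- Source B's main body: out = [0]*n; for j in range(n): out[_pos(j,n,k)] = s[j].
-- s[j] with 0 ≤ j < n is exactly s.getD j 0, and the assignment index is proved < n below,
-- so List.set is exact for out[...] = ... here.
def antisorted_alt (arr : List Int) (stack_limit : Int) : List Int :=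
  if stack_limit = 0 ∨ arr.length < 2 then arr
  else
    let s := PySem.List.sorted arr (fun x => x) false
    let n := s.length
    (List.range n).foldl (fun out j => out.set (posGo j n stack_limit 0) (s.getD j 0))
      (List.replicate n 0)

-- ===== PRECONDITION & SPEC =====
def Spec_antisorted (arr : List Int) (stack_limit : Int) (out : List Int) : Prop := out = antisorted_alt arr stack_limit
instance (arr : List Int) (stack_limit : Int) (out : List Int) : Decidable (Spec_antisorted arr stack_limit out) := by unfold Spec_antisorted; infer_instance

-- ===== CLAIM (what is proved, stated in full; the proofs are below) =====
def Claim_equal_antisorted : Prop := ∀ (arr : List Int) (stack_limit : Int), Dom_antisorted arr stack_limit → Spec_antisorted arr stack_limit (antisorted arr stack_limit)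

-- ===== LEMMAS AND PROOFS =====

-- the alternate deal of a list: first component = indices 0,2,4,…, second = indices 1,3,5,…
def deal : List Int → List Int × List Int
  | [] => ([], [])
  | a :: t => ((a :: (deal t).2), (deal t).1)

theorem deal_lengths (xs : List Int) :
    (deal xs).1.length = (xs.length + 1) / 2 ∧ (deal xs).2.length = xs.length / 2 := by
  induction xs with
  | nil => simp [deal]
  | cons a t ih => simp [deal]; omega

theorem deal_sublists (xs : List Int) : (deal xs).1.Sublist xs ∧ (deal xs).2.Sublist xs := by
  induction xs with
  | nil => simp [deal]
  | cons a t ih => exact ⟨List.cons_sublist_cons.mpr ih.2, ih.1.cons a⟩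

theorem deal_getD (xs : List Int) : ∀ (m : Nat) (d : Int),
    (deal xs).1.getD m d = xs.getD (2 * m) d ∧ (deal xs).2.getD m d = xs.getD (2 * m + 1) d := by
  induction xs with
  | nil => intro m d; simp [deal]
  | cons a t ih =>
    intro m d
    refine ⟨?_, ?_⟩
    · cases m with
      | zero => simp [deal]
      | succ m =>
        have h := (ih m d).2
        show (a :: (deal t).2).getD (m + 1) d = (a :: t).getD (2 * (m + 1)) d
        rw [show 2 * (m + 1) = (2 * m + 1) + 1 by omega]
        simpa [List.getD_cons_succ] using h
    · have h := (ih m d).1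
      show (deal t).1.getD m d = (a :: t).getD (2 * m + 1) d
      simpa [List.getD_cons_succ] using h

-- the specification recursion both ports are reduced to
def dealRec (s : List Int) (k : Int) : List Int :=
  if k = 0 ∨ s.length < 2 then s
  else dealRec (deal s).2 (k - 1) ++ dealRec (deal s).1 (k - 1)
  termination_by s.length
  decreasing_by
  · have := deal_lengths s; omega
  · have := deal_lengths s; omega

theorem posGo_add (n : Nat) : ∀ (i : Nat) (k : Int) (off : Nat),
    posGo i n k off = off + posGo i n k 0 := by
  induction n using Nat.strong_induction_on with
  | _ n ih =>
    intro i k off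
    conv_lhs => rw [posGo]
    conv_rhs => rw [posGo]
    by_cases h : k = 0 ∨ n < 2
    · rw [if_pos h, if_pos h]; omega
    · rw [if_neg h, if_neg h]
      by_cases hi : i % 2 = 1
      · simp only [hi, if_pos]
        exact ih (n / 2) (by omega) _ _ _
      · simp only [hi, reduceIte]
        rw [ih ((n + 1) / 2) (by omega) (i / 2) (k - 1) (off + n / 2),
            ih ((n + 1) / 2) (by omega) (i / 2) (k - 1) (0 + n / 2)]
        omega

theorem posGo_lt (n : Nat) : ∀ (i : Nat) (k : Int) (off : Nat),
    i < n → posGo i n k off < off + n := by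
  induction n using Nat.strong_induction_on with
  | _ n ih =>
    intro i k off hi
    by_cases h : k = 0 ∨ n < 2
    · rw [posGo, if_pos h]; omega
    · rw [posGo, if_neg h]
      by_cases hodd : i % 2 = 1
      · simp only [hodd, if_pos]
        have := ih (n / 2) (by omega) (i / 2) (k - 1) off (by omega)
        omega
      · simp only [hodd, reduceIte]
        have := ih ((n + 1) / 2) (by omega) (i / 2) (k - 1) (off + n / 2) (by omega)
        omega

-- setting every position j := s[j] over range rebuilds s
theorem setAll (s : List Int) : ∀ (init extra : List Int), init.length = s.length →
    (List.range s.length).foldl (fun o j => o.set j (s.getD j 0)) (init ++ extra) = s ++ extra := by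
  induction s using List.reverseRecOn with
  | nil => intro init extra h; simp at h; simp [h]
  | append_singleton t x ih =>
    intro init extra h
    simp at h
    obtain ⟨init', y, rfl⟩ : ∃ init' y, init = init' ++ [y] := by
      rcases List.eq_nil_or_concat init with rfl | ⟨i', y, rfl⟩
      · simp at h
      · exact ⟨i', y, by simp⟩
    simp at h
    have hcongr : (List.range t.length).foldl (fun o j => o.set j ((t ++ [x]).getD j 0))
        ((init' ++ [y]) ++ extra)
        = (List.range t.length).foldl (fun o j => o.set j (t.getD j 0)) (init' ++ ([y] ++ extra)) := by
      rw [List.append_assoc]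
      apply PySem.List.foldl_congr_mem
      intro o j hj
      have hj' : j < t.length := List.mem_range.mp hj
      rw [List.getD_append _ _ _ _ hj']
    rw [List.length_append, List.length_singleton, List.range_succ, List.foldl_append,
        List.foldl_cons, List.foldl_nil, hcongr, ih init' ([y] ++ extra) h]
    have : (t ++ [x]).getD t.length 0 = x := by
      simp
    rw [this, List.set_append_right _ _ (le_refl t.length)]
    simp

-- the interleaved fold over l ++ r splits into a fold on l (odd indices) and one on r (even)
theorem splitFold (s : List Int) (k : Int) (hk : ¬(k = 0 ∨ s.length < 2)) :
    ∀ (js : List Nat), (∀ j ∈ js, j < s.length) → ∀ (l r : List Int), l.length = s.length / 2 →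
    js.foldl (fun o j => o.set (posGo j s.length k 0) (s.getD j 0)) (l ++ r)
    = ((js.filter (fun j => j % 2 == 1)).foldl
        (fun o j => o.set (posGo (j / 2) (s.length / 2) (k - 1) 0) (s.getD j 0)) l)
      ++ ((js.filter (fun j => j % 2 == 0)).foldl
        (fun o j => o.set (posGo (j / 2) ((s.length + 1) / 2) (k - 1) 0) (s.getD j 0)) r) := by
  intro js
  induction js with
  | nil => intro _ l r _; simp
  | cons j js ih =>
    intro hmem l r hl
    have hj : j < s.length := hmem j (by simp)
    by_cases hodd : j % 2 = 1
    · have hstep : posGo j s.length k 0 = posGo (j / 2) (s.length / 2) (k - 1) 0 := by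
        rw [posGo, if_neg hk, if_pos hodd]
      have hlt : posGo (j / 2) (s.length / 2) (k - 1) 0 < l.length := by
        rw [hl]
        have := posGo_lt (s.length / 2) (j / 2) (k - 1) 0 (by omega)
        omega
      rw [List.foldl_cons, hstep, List.set_append_left _ _ hlt]
      rw [ih (fun x hx => hmem x (by simp [hx])) _ _ (by simp [hl])]
      simp [hodd]
    · have heven : j % 2 = 0 := by omega
      have hstep : posGo j s.length k 0
          = l.length + posGo (j / 2) ((s.length + 1) / 2) (k - 1) 0 := by
        rw [posGo, if_neg hk, if_neg hodd, posGo_add, hl]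
        omega
      rw [List.foldl_cons, hstep,
          List.set_append_right _ _ (Nat.le_add_right _ _)]
      rw [Nat.add_sub_cancel_left]
      rw [ih (fun x hx => hmem x (by simp [hx])) _ _ hl]
      simp [heven]

-- parity split of range n
theorem rangeParity : ∀ (n : Nat),
    (List.range n).filter (fun j => j % 2 == 1) = (List.range (n / 2)).map (fun m => 2 * m + 1)
    ∧ (List.range n).filter (fun j => j % 2 == 0)
        = (List.range ((n + 1) / 2)).map (fun m => 2 * m) := by
  intro n
  induction n with
  | zero => simp
  | succ n ih =>
    rw [List.range_succ, List.filter_append, List.filter_append, ih.1, ih.2]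
    by_cases hpar : n % 2 = 0
    · constructor
      · rw [show (n + 1) / 2 = n / 2 by omega]
        simp [hpar]
      · rw [show (n + 1 + 1) / 2 = (n + 1) / 2 + 1 by omega, List.range_succ, List.map_append]
        simp [hpar]
        omega
    · constructor
      · rw [show (n + 1) / 2 = n / 2 + 1 by omega, List.range_succ, List.map_append]
        have h1 : n % 2 = 1 := by omega
        simp [h1]
        omega
      · rw [show (n + 1 + 1) / 2 = (n + 1) / 2 by omega]
        have h1 : n % 2 = 1 := by omega
        simp [h1]

theorem place_eq_dealRec_aux : ∀ (N : Nat) (s : List Int), s.length ≤ N → ∀ (k : Int),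
    (List.range s.length).foldl
      (fun o j => o.set (posGo j s.length k 0) (s.getD j 0))
      (List.replicate s.length 0) = dealRec s k := by
  intro N
  induction N with
  | zero =>
    intro s hs k
    have : s = [] := List.eq_nil_of_length_eq_zero (by omega)
    subst this
    rw [dealRec]; simp
  | succ N ih =>
    intro s hs k
    by_cases hg : k = 0 ∨ s.length < 2
    · rw [dealRec, if_pos hg]
      have hcongr : (List.range s.length).foldl
          (fun o j => o.set (posGo j s.length k 0) (s.getD j 0)) (List.replicate s.length 0)
          = (List.range s.length).foldl
          (fun o j => o.set j (s.getD j 0)) (List.replicate s.length 0 ++ []) := by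
        rw [List.append_nil]
        apply PySem.List.foldl_congr_mem
        intro o j hj
        rw [posGo, if_pos hg, Nat.zero_add]
      rw [hcongr, setAll s _ [] (by simp), List.append_nil]
    · have hO := (deal_lengths s).2
      have hE := (deal_lengths s).1
      have hrep : List.replicate s.length (0 : Int)
          = List.replicate (s.length / 2) 0 ++ List.replicate ((s.length + 1) / 2) 0 := by
        rw [← List.replicate_add]
        congr 1
        omega
      rw [hrep, splitFold s k hg _ (fun j hj => List.mem_range.mp hj) _ _ (by simp),
          (rangeParity s.length).1, (rangeParity s.length).2, List.foldl_map, List.foldl_map]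
      have hoddF : (List.range (s.length / 2)).foldl
          (fun o m => o.set (posGo ((2 * m + 1) / 2) (s.length / 2) (k - 1) 0)
            (s.getD (2 * m + 1) 0)) (List.replicate (s.length / 2) 0)
          = (List.range (deal s).2.length).foldl
          (fun o m => o.set (posGo m (deal s).2.length (k - 1) 0) ((deal s).2.getD m 0))
          (List.replicate (deal s).2.length 0) := by
        rw [hO]
        apply PySem.List.foldl_congr_mem
        intro o m hm
        rw [show (2 * m + 1) / 2 = m by omega, (deal_getD s m 0).2]
      have hevenF : (List.range ((s.length + 1) / 2)).foldl
          (fun o m => o.set (posGo (2 * m / 2) ((s.length + 1) / 2) (k - 1) 0)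
            (s.getD (2 * m) 0)) (List.replicate ((s.length + 1) / 2) 0)
          = (List.range (deal s).1.length).foldl
          (fun o m => o.set (posGo m (deal s).1.length (k - 1) 0) ((deal s).1.getD m 0))
          (List.replicate (deal s).1.length 0) := by
        rw [hE]
        apply PySem.List.foldl_congr_mem
        intro o m hm
        rw [show 2 * m / 2 = m by omega, (deal_getD s m 0).1]
      rw [hoddF, hevenF, ih (deal s).2 (by omega) (k - 1), ih (deal s).1 (by omega) (k - 1)]
      conv_rhs => rw [dealRec]
      rw [if_neg hg]

theorem place_eq_dealRec (s : List Int) : ∀ (k : Int),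
    (List.range s.length).foldl
      (fun o j => o.set (posGo j s.length k 0) (s.getD j 0))
      (List.replicate s.length 0) = dealRec s k :=
  fun k => place_eq_dealRec_aux s.length s (le_refl _) k

theorem dealLoop_eq (s : List Int) : ∀ (fuel i : Nat) (l r : List Int),
    i < s.length → s.length ≤ i + 2 + 2 * fuel →
    dealLoop s s.length fuel i l r = (l ++ (deal (s.drop i)).2, r ++ (deal (s.drop i)).1) := by
  intro fuel
  induction fuel with
  | zero =>
    intro i l r hi hb
    have hget : ∀ (j : Nat) (h : j < s.length), (PySem.List.pyGet? s (j : Int)).getD 0 = s[j] := by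
      intro j h
      simp [PySem.List.pyGet?_natCast, List.getElem?_eq_getElem h]
    have hdrop : s.drop i = s[i] :: s.drop (i + 1) := List.drop_eq_getElem_cons hi
    rw [dealLoop]
    by_cases h1 : i + 1 = s.length
    · have hnil : s.drop (i + 1) = [] := by simp [h1]
      rw [if_pos h1, hdrop, hnil]
      simp [deal, List.getElem?_eq_getElem hi]
    · have hi1 : i + 1 < s.length := by omega
      have h2 : i + 2 = s.length := by omega
      have hcast : (i : Int) + 1 = ((i + 1 : Nat) : Int) := by push_cast; ring
      have hdrop1 : s.drop (i + 1) = s[i+1] :: s.drop (i + 2) := List.drop_eq_getElem_cons hi1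
      have hnil : s.drop (i + 2) = [] := by simp [h2]
      rw [if_neg h1, if_pos h2, hcast, hdrop, hdrop1, hnil]
      simp [deal, List.getElem?_eq_getElem hi]
      rw [hcast]
      exact hget (i + 1) hi1
  | succ fuel ih =>
    intro i l r hi hb
    have hget : ∀ (j : Nat) (h : j < s.length), (PySem.List.pyGet? s (j : Int)).getD 0 = s[j] := by
      intro j h
      simp [PySem.List.pyGet?_natCast, List.getElem?_eq_getElem h]
    have hdrop : s.drop i = s[i] :: s.drop (i + 1) := List.drop_eq_getElem_cons hi
    rw [dealLoop]
    by_cases h1 : i + 1 = s.length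
    · have hnil : s.drop (i + 1) = [] := by simp [h1]
      rw [if_pos h1, hdrop, hnil]
      simp [deal, List.getElem?_eq_getElem hi]
    · have hi1 : i + 1 < s.length := by omega
      have hcast : (i : Int) + 1 = ((i + 1 : Nat) : Int) := by push_cast; ring
      have hdrop1 : s.drop (i + 1) = s[i+1] :: s.drop (i + 2) := List.drop_eq_getElem_cons hi1
      by_cases h2 : i + 2 = s.length
      · have hnil : s.drop (i + 2) = [] := by simp [h2]
        rw [if_neg h1, if_pos h2, hcast, hdrop, hdrop1, hnil]
        simp [deal, List.getElem?_eq_getElem hi]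
        rw [hcast]
        exact hget (i + 1) hi1
      · have h2' : i + 2 < s.length := by omega
        rw [if_neg h1, if_neg h2]
        show dealLoop s s.length fuel (i + 2) (l ++ [(PySem.List.pyGet? s ((i : Int) + 1)).getD 0])
              (r ++ [(PySem.List.pyGet? s (i : Int)).getD 0]) = _
        rw [ih (i + 2) _ _ h2' (by omega)]
        rw [hdrop, hdrop1]
        simp [deal, List.getElem?_eq_getElem hi]
        rw [hcast]
        exact hget (i + 1) hi1

-- on an already-sorted list, A's recursion coincides with dealRec
theorem antisortedGo_eq_dealRec : ∀ (n : Nat), ∀ (f : Nat) (s : List Int) (k : Int),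
    s.length ≤ n → s.length ≤ f →
    s.Pairwise (· ≤ ·) → antisortedGo f s k = dealRec s k := by
  intro n
  induction n with
  | zero =>
    intro f s k hn _ _
    have : s = [] := List.eq_nil_of_length_eq_zero (by omega)
    subst this
    rw [antisortedGo.eq_def, dealRec]; simp
  | succ n ih =>
    intro f s k hn hf hp
    rw [antisortedGo.eq_def, dealRec]
    by_cases hk : k = 0
    · simp [hk]
    by_cases hl : s.length < 2
    · simp [hk, hl]
    rw [if_neg hk, if_neg hl, if_neg (show ¬(k = 0 ∨ s.length < 2) by omega)]
    obtain ⟨g, rfl⟩ : ∃ g, f = g + 1 := ⟨f - 1, by omega⟩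
    have hsort : PySem.List.sorted s (fun x => x) false = s :=
      PySem.List.sorted_eq_self_of_pairwise s (fun x => x) hp
    have hdl := dealLoop_eq s s.length 0 [] [] (by omega) (by omega)
    simp only [List.drop_zero, List.nil_append] at hdl
    simp only [hsort, hdl]
    have hlen := deal_lengths s
    have hsub := deal_sublists s
    rw [ih g (deal s).2 (k - 1) (by omega) (by omega) (hp.sublist hsub.2),
        ih g (deal s).1 (k - 1) (by omega) (by omega) (hp.sublist hsub.1)]

-- ===== VERDICT (by name: the statement is the Claim_ definition above) =====
theorem antisorted_spec : Claim_equal_antisorted := by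
  intro arr k _
  unfold Spec_antisorted
  rw [antisorted, antisortedGo.eq_def, antisorted_alt]
  by_cases hk : k = 0
  · simp [hk]
  by_cases hl : arr.length < 2
  · simp [hk, hl]
  rw [if_neg hk, if_neg hl, if_neg (show ¬(k = 0 ∨ arr.length < 2) by omega)]
  obtain ⟨m, hm⟩ : ∃ m, arr.length = m + 1 := ⟨arr.length - 1, by omega⟩
  have hslen : (PySem.List.sorted arr (fun x => x) false).length = arr.length :=
    PySem.List.length_sorted arr (fun x => x) false
  have hp : (PySem.List.sorted arr (fun x => x) false).Pairwise (· ≤ ·) :=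
    PySem.List.sorted_pairwise arr (fun x => x)
  have hdl := dealLoop_eq (PySem.List.sorted arr (fun x => x) false) arr.length 0 [] []
    (by omega) (by omega)
  simp only [List.drop_zero, List.nil_append] at hdl
  rw [hslen, hm] at hdl
  rw [hm]
  simp only [hdl]
  have hlen := deal_lengths (PySem.List.sorted arr (fun x => x) false)
  have hsub := deal_sublists (PySem.List.sorted arr (fun x => x) false)
  rw [place_eq_dealRec]
  rw [dealRec, if_neg (show ¬(k = 0 ∨ (PySem.List.sorted arr (fun x => x) false).length < 2) by
    rw [hslen]; omega)]
  rw [antisortedGo_eq_dealRec (m + 1) m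
        (deal (PySem.List.sorted arr (fun x => x) false)).2 (k - 1)
        (by rw [hslen] at hlen; omega) (by rw [hslen] at hlen; omega) (hp.sublist hsub.2),
      antisortedGo_eq_dealRec (m + 1) m
        (deal (PySem.List.sorted arr (fun x => x) false)).1 (k - 1)
        (by rw [hslen] at hlen; omega) (by rw [hslen] at hlen; omega) (hp.sublist hsub.1)]
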